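-- pv_equiv track=rewrite | github.com/jemiezler/SeniorProject | python/3_1_train.py | progressive_features
-- ===== SOURCE A (Python) =====
-- from itertools import combinations
--
-- def progressive_features(features_dict):
--     feature_combinations = {}
--     feature_groups = list(features_dict.keys())
--     for i in range(1, len(feature_groups) + 1):
--         for comb in combinations(feature_groups, i):
--             combined_columns = sum([features_dict[key] for key in comb], [])
--             feature_combinations[",".join(comb)] = combined_columns
--     return feature_combinations
-- ===== SOURCE B (Python) =====
-- def progressive_features(features_dict):
--     items = list(features_dict.items())
--     n = len(items)
--     result = {}
--     # layer of size-k subsets as (names, cols, last index used), extended index-wise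
--     layer = [([], [], -1)]
--     for _ in range(n):
--         nxt = []
--         for names, cols, last in layer:
--             for j in range(last + 1, n):
--                 nxt.append((names + [items[j][0]], cols + items[j][1], j))
--         for names, cols, _ in nxt:
--             result[",".join(names)] = cols
--         layer = nxt
--     return result
-- ===== Notes on version B (the rewrite author's own statement) =====
-- stated objective: alternative
-- what changed: Replaces itertools.combinations over the key list plus a per-combination re-summation of dict lookups by a dynamic layer extension: size-(k+1) subsets are built from the stored size-k subsets by appending each later group and reusing the already-merged column list, with no dict lookup per combination.
import Mathlib
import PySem

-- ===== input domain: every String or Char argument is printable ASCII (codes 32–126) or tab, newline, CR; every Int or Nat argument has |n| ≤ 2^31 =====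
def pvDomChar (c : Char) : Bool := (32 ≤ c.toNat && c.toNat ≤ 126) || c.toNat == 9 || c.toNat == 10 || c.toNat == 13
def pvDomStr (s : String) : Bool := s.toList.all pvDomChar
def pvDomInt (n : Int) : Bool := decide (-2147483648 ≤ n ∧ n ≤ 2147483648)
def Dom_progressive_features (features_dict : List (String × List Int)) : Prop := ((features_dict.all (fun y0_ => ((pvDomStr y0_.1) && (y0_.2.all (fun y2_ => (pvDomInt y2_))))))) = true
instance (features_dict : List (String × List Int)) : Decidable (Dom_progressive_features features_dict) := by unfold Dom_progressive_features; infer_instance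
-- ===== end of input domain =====

-- B replaces itertools.combinations + per-combination dict-lookup summation by a dynamic
-- layer extension: size-(k+1) subsets are built from the stored size-k subsets by appending
-- each later group, reusing the already-merged columns (alternative decomposition, similar cost).


-- ===== PORT A =====
-- for i in range(1, len(feature_groups)+1): for comb in combinations(feature_groups, i):
--   feature_combinations[",".join(comb)] = sum([features_dict[key] for key in comb], [])
-- (sum(list_of_lists, []) is List.flatten; itertools.combinations is PySem.List.combinations)
def progressive_features (features_dict : List (String × List Int)) : List (String × List Int) :=
  let d := PySem.Dict.ofList features_dict
  let feature_groups := PySem.Dict.keys d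
  let feature_combinations :=
    (PySem.List.pyRange 1 ((feature_groups.length : Int) + 1) 1).foldl
      (fun acc i =>
        (PySem.List.combinations feature_groups i.toNat).foldl
          (fun acc comb =>
            acc.insert (PySem.Str.join "," comb)
              ((comb.map (fun key => PySem.Dict.getD d key [])).flatten))
          acc)
      PySem.Dict.empty
  feature_combinations.items

-- ===== PORT B =====
-- port of Source B: a layer of (names, cols, last index) triples, extended index-wise each round
def progressive_features_alt (features_dict : List (String × List Int)) : List (String × List Int) :=
  let items := (PySem.Dict.ofList features_dict).items
  let n := items.length
  let st :=
    (PySem.List.pyRange 0 (n : Int) 1).foldl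
      (fun st _ =>
        let nxt := st.2.foldl
          (fun nxt t =>
            nxt ++ (PySem.List.pyRange (t.2.2 + 1) (n : Int) 1).map
              (fun j => (t.1 ++ [(PySem.List.pyGetD items j ("", [])).1],
                         t.2.1 ++ (PySem.List.pyGetD items j ("", [])).2, j)))
          []
        ((nxt.foldl (fun r t => r.insert (PySem.Str.join "," t.1) t.2.1) st.1 : PySem.Dict String (List Int)), nxt))
      ((PySem.Dict.empty : PySem.Dict String (List Int)), [(([] : List String), ([] : List Int), (-1 : Int))])
  st.1.items

-- ===== PRECONDITION & SPEC =====
def Spec_progressive_features (features_dict : List (String × List Int)) (out : List (String × List Int)) : Prop := out = progressive_features_alt features_dict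
instance (features_dict : List (String × List Int)) (out : List (String × List Int)) : Decidable (Spec_progressive_features features_dict out) := by unfold Spec_progressive_features; infer_instance

-- ===== CLAIM (what is proved, stated in full; the proofs are below) =====
def Claim_equal_progressive_features : Prop := ∀ (features_dict : List (String × List Int)), Dom_progressive_features features_dict → Spec_progressive_features features_dict (progressive_features features_dict)

-- ===== LEMMAS AND PROOFS =====

-- combinations with the remaining suffix: (chosen elements, rest of the list after the last chosen)
def pvCwr {α : Type} : List α → Nat → List (List α × List α)
  | xs, 0 => [([], xs)]
  | [], _ + 1 => []
  | x :: xs, k + 1 => (pvCwr xs k).map (fun p => (x :: p.1, p.2)) ++ pvCwr xs (k + 1)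

theorem pvCwr_fst {α : Type} (xs : List α) (k : Nat) :
    (pvCwr xs k).map Prod.fst = PySem.List.combinations xs k := by
  induction xs generalizing k with
  | nil => cases k <;> simp [pvCwr, PySem.List.combinations_zero, PySem.List.combinations_nil_succ]
  | cons x xs ih =>
      cases k with
      | zero => simp [pvCwr, PySem.List.combinations_zero]
      | succ k =>
          simp [pvCwr, PySem.List.combinations_cons_succ, ← ih, List.map_map, Function.comp_def]

theorem pvCwr_suffix {α : Type} (xs : List α) (k : Nat) :
    ∀ p ∈ pvCwr xs k, p.2.IsSuffix xs := by
  induction xs generalizing k with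
  | nil => cases k <;> simp [pvCwr]
  | cons x xs ih =>
      cases k with
      | zero => simp [pvCwr]
      | succ k =>
          intro p hp
          simp only [pvCwr, List.mem_append, List.mem_map] at hp
          rcases hp with ⟨q, hq, rfl⟩ | hp
          · exact (ih k q hq).trans (List.suffix_cons x xs)
          · exact (ih (k + 1) p hp).trans (List.suffix_cons x xs)

-- lex extension: (k+1)-combinations are the k-combinations each extended by one later element
theorem pvCwr_ext {α : Type} (xs : List α) (k : Nat) :
    pvCwr xs (k + 1)
      = (pvCwr xs k).flatMap (fun p => (pvCwr p.2 1).map (fun q => (p.1 ++ q.1, q.2))) := by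
  induction xs generalizing k with
  | nil => cases k <;> simp [pvCwr]
  | cons x xs ih =>
      cases k with
      | zero =>
          simp [pvCwr]
      | succ k =>
          simp only [pvCwr, List.flatMap_append, List.flatMap_map]
          rw [← ih (k + 1)]
          congr 1
          rw [ih k, List.map_flatMap]
          simp [List.map_map, Function.comp_def]

theorem pvCwr_mem_fst {α : Type} (xs : List α) (k : Nat) :
    ∀ p ∈ pvCwr xs k, ∀ a ∈ p.1, a ∈ xs := by
  induction xs generalizing k with
  | nil => cases k <;> simp [pvCwr]
  | cons x xs ih =>
      cases k with
      | zero => simp [pvCwr]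
      | succ k =>
          intro p hp a ha
          simp only [pvCwr, List.mem_append, List.mem_map] at hp
          rcases hp with ⟨q, hq, rfl⟩ | hp
          · rcases List.mem_cons.mp ha with rfl | ha
            · exact List.mem_cons_self ..
            · exact List.mem_cons_of_mem _ (ih k q hq a ha)
          · exact List.mem_cons_of_mem _ (ih (k + 1) p hp a ha)

-- the j-loop over indices after `last` is exactly the one-element extension of the rest suffix
theorem pvRange_cwr_one (rest : List (String × List Int)) : ∀ (pre : List (String × List Int))
    (ns : List String) (cs : List Int),
    (PySem.List.pyRange (pre.length : Int) (((pre ++ rest).length : Int)) 1).map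
      (fun j => (ns ++ [(PySem.List.pyGetD (pre ++ rest) j ("", [])).1],
                 cs ++ (PySem.List.pyGetD (pre ++ rest) j ("", [])).2, j))
    = (pvCwr rest 1).map (fun q => (ns ++ q.1.map Prod.fst, cs ++ (q.1.map Prod.snd).flatten,
        (((pre ++ rest).length : Int) - q.2.length - 1))) := by
  induction rest with
  | nil =>
      intro pre ns cs
      simp [pvCwr, PySem.List.pyRange]
  | cons x rest ih =>
      intro pre ns cs
      have hlt : (pre.length : Int) < ((pre ++ x :: rest).length : Int) := by
        simp only [List.length_append, List.length_cons]; push_cast; omega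
      rw [PySem.List.pyRange_one_cons hlt]
      have hx : PySem.List.pyGetD (pre ++ x :: rest) (pre.length : Int) ("", []) = x := by
        simp [List.getD_eq_getElem?_getD]
      have ih' := ih (pre ++ [x]) ns cs
      rw [← List.append_cons] at ih'
      simp only [List.length_append, List.length_cons, List.length_nil] at ih' ⊢
      simp only [pvCwr, List.map_cons, List.map_nil, List.nil_append,
        List.cons_append, hx]
      push_cast at ih' ⊢
      congr 1
      simp
      omega

-- one layer of (names, merged columns, last index) triples, as specified by pvCwr
def pvLayer (items : List (String × List Int)) (k : Nat) : List (List String × List Int × Int) :=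
  (pvCwr items k).map (fun p =>
    (p.1.map Prod.fst, (p.1.map Prod.snd).flatten, (items.length : Int) - p.2.length - 1))

theorem pvStep (items : List (String × List Int)) (k : Nat) :
    (pvLayer items k).foldl
      (fun nxt t =>
        nxt ++ (PySem.List.pyRange (t.2.2 + 1) ((items.length : Nat) : Int) 1).map
          (fun j => (t.1 ++ [(PySem.List.pyGetD items j ("", [])).1],
                     t.2.1 ++ (PySem.List.pyGetD items j ("", [])).2, j)))
      []
    = pvLayer items (k + 1) := by
  rw [PySem.List.foldl_append_eq_flatMap, List.nil_append]
  simp only [pvLayer]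
  rw [pvCwr_ext, List.map_flatMap, List.flatMap_map]
  apply List.flatMap_congr
  intro p hp
  obtain ⟨pre, hpre⟩ := pvCwr_suffix items k p hp
  have hstart : ((items.length : Int) - (p.2.length : Int) - 1) + 1 = (pre.length : Int) := by
    have : pre.length + p.2.length = items.length := by
      rw [← hpre]; simp
    omega
  rw [hstart, ← hpre]
  rw [pvRange_cwr_one p.2 pre (p.1.map Prod.fst) ((p.1.map Prod.snd).flatten)]
  simp [List.map_map, Function.comp_def]

theorem pvInsert (fd : List (String × List Int)) (k : Nat) (r : PySem.Dict String (List Int)) :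
    (pvLayer (PySem.Dict.ofList fd).items (k + 1)).foldl
      (fun r t => r.insert (PySem.Str.join "," t.1) t.2.1) r
    = (PySem.List.combinations (PySem.Dict.keys (PySem.Dict.ofList fd)) (k + 1)).foldl
        (fun acc comb => acc.insert (PySem.Str.join "," comb)
          ((comb.map (fun key => PySem.Dict.getD (PySem.Dict.ofList fd) key [])).flatten)) r := by
  have hnd : (PySem.Dict.ofList fd).keys.Nodup := PySem.Dict.nodup_keys_ofList fd
  have hval : ∀ c ∈ pvCwr (PySem.Dict.ofList fd).items (k + 1),
      (c.1.map Prod.fst).map (fun key => PySem.Dict.getD (PySem.Dict.ofList fd) key [])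
        = c.1.map Prod.snd := by
    intro c hc
    rw [List.map_map]
    apply List.map_congr_left
    intro a ha
    obtain ⟨x, v⟩ := a
    exact PySem.Dict.getD_of_mem_items _
      (pvCwr_mem_fst (PySem.Dict.ofList fd).items (k + 1) c hc (x, v) ha) hnd []
  rw [show PySem.Dict.keys (PySem.Dict.ofList fd)
        = (PySem.Dict.ofList fd).items.map Prod.fst from rfl]
  rw [PySem.List.combinations_map, ← pvCwr_fst]
  simp only [pvLayer, List.foldl_map, List.map_map]
  apply PySem.List.foldl_congr_mem
  intro acc c hc
  simp only [Function.comp_def]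
  rw [hval c hc]

theorem pvMain (fd : List (String × List Int)) : ∀ (m k : Nat) (r : PySem.Dict String (List Int)),
    k + m = (PySem.Dict.ofList fd).items.length →
    ((PySem.List.pyRange (k : Int) (((PySem.Dict.ofList fd).items.length : Nat) : Int) 1).foldl
      (fun st _ =>
        let nxt := st.2.foldl
          (fun nxt t =>
            nxt ++ (PySem.List.pyRange (t.2.2 + 1) (((PySem.Dict.ofList fd).items.length : Nat) : Int) 1).map
              (fun j => (t.1 ++ [(PySem.List.pyGetD (PySem.Dict.ofList fd).items j ("", [])).1],
                         t.2.1 ++ (PySem.List.pyGetD (PySem.Dict.ofList fd).items j ("", [])).2, j)))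
          []
        ((nxt.foldl (fun r t => r.insert (PySem.Str.join "," t.1) t.2.1) st.1 : PySem.Dict String (List Int)), nxt))
      (r, pvLayer (PySem.Dict.ofList fd).items k)).1
    = (PySem.List.pyRange ((k : Int) + 1) (((PySem.Dict.ofList fd).items.length : Int) + 1) 1).foldl
        (fun acc i =>
          (PySem.List.combinations (PySem.Dict.keys (PySem.Dict.ofList fd)) i.toNat).foldl
            (fun acc comb =>
              acc.insert (PySem.Str.join "," comb)
                ((comb.map (fun key => PySem.Dict.getD (PySem.Dict.ofList fd) key [])).flatten))
            acc)
        r := by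
  intro m
  induction m with
  | zero =>
      intro k r hk
      have hkn : k = (PySem.Dict.ofList fd).items.length := by omega
      subst hkn
      simp [PySem.List.pyRange]
  | succ m ih =>
      intro k r hk
      have hkn : k < (PySem.Dict.ofList fd).items.length := by omega
      rw [PySem.List.pyRange_one_cons (show (k : Int) < ((PySem.Dict.ofList fd).items.length : Int) by exact_mod_cast hkn)]
      rw [PySem.List.pyRange_one_cons (show (k : Int) + 1 < ((PySem.Dict.ofList fd).items.length : Int) + 1 by
        have : (k : Int) < ((PySem.Dict.ofList fd).items.length : Int) := by exact_mod_cast hkn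
        omega)]
      simp only [List.foldl_cons]
      rw [pvStep (PySem.Dict.ofList fd).items k]
      rw [pvInsert fd k r]
      rw [show ((k : Int) + 1) = (((k + 1 : Nat) : Int)) by push_cast; ring]
      rw [show (((k + 1 : Nat) : Int)).toNat = k + 1 from Int.toNat_natCast (k + 1)]
      exact ih (k + 1) _ (by omega)

-- ===== VERDICT (by name: the statement is the Claim_ definition above) =====
theorem progressive_features_spec : Claim_equal_progressive_features := by
  intro fd _
  unfold Spec_progressive_features progressive_features progressive_features_alt
  have h0 : pvLayer (PySem.Dict.ofList fd).items 0 = [(([] : List String), ([] : List Int), (-1 : Int))] := by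
    simp [pvLayer, pvCwr]
  have hm := pvMain fd (PySem.Dict.ofList fd).items.length 0 PySem.Dict.empty (by omega)
  rw [h0] at hm
  simp only [Nat.cast_zero, zero_add] at hm
  simp only [PySem.Dict.keys, List.length_map]
  exact congrArg PySem.Dict.items hm.symm
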